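-- pv_equiv track=rewrite | github.com/Trinedi/national_destinies_site | scripts/build/extract_starters.py | formable_target_locations
-- ===== SOURCE A (Python) =====
-- def formable_target_locations(rec: dict, geography: dict,
--                               area_to_locs: dict, region_to_locs: dict) -> tuple[set[str], set[str]]:
--     """Return (core_locs, region_locs).
--
--     `core_locs` are the formable's must_own + explicit `locations` blocks
--     (named individually). `region_locs` are everything reachable through
--     areas / regions / provinces / sub_continents / continents -- the broader
--     territory pool. Tags overlapping core_locs are weighted heavier.
--     """
--     core: set[str] = set()
--     region: set[str] = set()
--
--     for loc in rec.get("locations") or []: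
--         core.add(loc)
--     for must in rec.get("must_own") or []:
--         core.add(must)
--
--     for area in rec.get("areas") or []:
--         region.update(area_to_locs.get(area, []))
--     for reg in rec.get("regions") or []:
--         region.update(region_to_locs.get(reg, []))
--     provinces = geography.get("provinces") or {}
--     for prov in rec.get("provinces") or []:
--         region.update(provinces.get(prov, {}).get("locations", []))
--     subregions = geography.get("subregions") or {}
--     continents = geography.get("continents") or {}
--     for sub in rec.get("sub_continents") or []:
--         for reg in subregions.get(sub, {}).get("regions", []):
--             region.update(region_to_locs.get(reg, []))
--     for cont in rec.get("continents") or []: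
--         for sub in continents.get(cont, {}).get("subregions", []):
--             for reg in subregions.get(sub, {}).get("regions", []):
--                 region.update(region_to_locs.get(reg, []))
--
--     # Don't double-count: locations already in core shouldn't bleed into region pool.
--     region -= core
--     return core, region
-- ===== SOURCE B (Python) =====
-- def formable_target_locations(rec: dict, geography: dict,
--                               area_to_locs: dict, region_to_locs: dict) -> tuple[set[str], set[str]]:
--     """Worklist interpreter: instead of A's five staged loops plus a final set
--     subtraction, build core first, seed one agenda of tagged tasks, and run a
--     single dispatch loop in which container tasks (continents, sub_continents)
--     splice their children back onto the front of the agenda and leaf tasks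
--     emit locations, filtered against core at insertion time."""
--     provinces = geography.get("provinces") or {}
--     subregions = geography.get("subregions") or {}
--     continents = geography.get("continents") or {}
--
--     core = set(rec.get("locations") or [])
--     core.update(rec.get("must_own") or [])
--
--     agenda = (
--         [("areas", a) for a in rec.get("areas") or []]
--         + [("regions", r) for r in rec.get("regions") or []]
--         + [("provinces", p) for p in rec.get("provinces") or []]
--         + [("sub_continents", s) for s in rec.get("sub_continents") or []]
--         + [("continents", c) for c in rec.get("continents") or []]
--     )
--
--     region: set[str] = set()
--     while agenda:
--         kind, key = agenda.pop(0)
--         if kind == "continents":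
--             agenda[:0] = [("sub_continents", s)
--                           for s in continents.get(key, {}).get("subregions", [])]
--         elif kind == "sub_continents":
--             agenda[:0] = [("regions", r)
--                           for r in subregions.get(key, {}).get("regions", [])]
--         else:
--             if kind == "areas":
--                 locs = area_to_locs.get(key, [])
--             elif kind == "regions":
--                 locs = region_to_locs.get(key, [])
--             else:
--                 locs = provinces.get(key, {}).get("locations", [])
--             for loc in locs:
--                 if loc not in core:
--                     region.add(loc)
--     return core, region
-- ===== Notes on version B (the rewrite author's own statement) =====
-- stated objective: alternative
-- what changed: A runs five separate aggregation loops (including a triple-nested continents loop) and subtracts core at the end; B builds core first, seeds a single tagged-task agenda and runs one worklist dispatch loop in which continent/sub-continent tasks splice their children onto the agenda and leaf tasks emit locations filtered against core at insertion, so no final subtraction pass is needed.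
import Mathlib
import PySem

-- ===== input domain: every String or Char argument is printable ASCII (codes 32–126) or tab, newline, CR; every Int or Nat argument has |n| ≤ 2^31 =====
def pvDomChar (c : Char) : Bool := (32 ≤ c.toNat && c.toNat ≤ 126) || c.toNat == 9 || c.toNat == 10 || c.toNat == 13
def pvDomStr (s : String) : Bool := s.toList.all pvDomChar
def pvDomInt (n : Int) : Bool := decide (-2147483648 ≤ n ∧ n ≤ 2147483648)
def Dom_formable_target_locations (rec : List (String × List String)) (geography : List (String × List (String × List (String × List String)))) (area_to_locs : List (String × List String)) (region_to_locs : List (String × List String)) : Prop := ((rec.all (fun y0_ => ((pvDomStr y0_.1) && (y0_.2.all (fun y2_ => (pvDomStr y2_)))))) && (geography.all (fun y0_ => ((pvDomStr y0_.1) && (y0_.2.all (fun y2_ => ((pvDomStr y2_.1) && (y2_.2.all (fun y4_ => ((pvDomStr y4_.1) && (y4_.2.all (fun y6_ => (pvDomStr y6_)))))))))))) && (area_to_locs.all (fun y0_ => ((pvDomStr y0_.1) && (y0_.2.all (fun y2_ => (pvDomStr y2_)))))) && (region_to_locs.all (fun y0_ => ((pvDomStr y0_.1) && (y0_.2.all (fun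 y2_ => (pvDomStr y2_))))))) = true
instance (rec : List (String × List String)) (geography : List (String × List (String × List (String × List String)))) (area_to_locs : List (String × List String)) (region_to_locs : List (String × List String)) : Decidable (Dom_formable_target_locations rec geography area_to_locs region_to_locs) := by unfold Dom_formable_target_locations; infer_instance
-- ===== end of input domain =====

-- B replaces A's five staged loops + final set subtraction by a single worklist
-- dispatch loop over tagged tasks (containers splice children onto the agenda,
-- leaves emit locations filtered against core at insertion) — objective: alternative.


-- ===== PORT A =====
def formable_target_locations (rec : List (String × List String)) (geography : List (String × List (String × List (String × List String)))) (area_to_locs : List (String × List String)) (region_to_locs : List (String × List String)) : List String × List String :=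
  let recd := PySem.Dict.mk rec
  let atd := PySem.Dict.mk area_to_locs
  let rtd := PySem.Dict.mk region_to_locs
  -- for loc in rec.get("locations") or []: core.add(loc); for must in …: core.add(must)
  let core : PySem.Set String := (recd.getD "locations" []).foldl PySem.Set.add PySem.Set.empty
  let core := (recd.getD "must_own" []).foldl PySem.Set.add core
  -- for area in …: region.update(area_to_locs.get(area, []))
  let region : PySem.Set String := (recd.getD "areas" []).foldl (fun s a => PySem.Set.update s (atd.getD a [])) PySem.Set.empty
  -- for reg in …: region.update(region_to_locs.get(reg, []))
  let region := (recd.getD "regions" []).foldl (fun s r => PySem.Set.update s (rtd.getD r [])) region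
  let geod := PySem.Dict.mk geography
  let provinces := PySem.Dict.mk (geod.getD "provinces" [])
  let region := (recd.getD "provinces" []).foldl (fun s p => PySem.Set.update s ((PySem.Dict.mk (provinces.getD p [])).getD "locations" [])) region
  let subregions := PySem.Dict.mk (geod.getD "subregions" [])
  let continents := PySem.Dict.mk (geod.getD "continents" [])
  let region := (recd.getD "sub_continents" []).foldl (fun s sub => ((PySem.Dict.mk (subregions.getD sub [])).getD "regions" []).foldl (fun s r => PySem.Set.update s (rtd.getD r [])) s) region
  let region := (recd.getD "continents" []).foldl (fun s cont => ((PySem.Dict.mk (continents.getD cont [])).getD "subregions" []).foldl (fun s sub => ((PySem.Dict.mk (subregions.getD sub [])).getD "regions" []).foldl (fun s r => PySem.Set.update s (rtd.getD r [])) s) s) region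
  (core, PySem.Set.diff region core)

-- ===== PORT B =====
-- task tags of B's agenda
inductive PvKind : Type
  | areas | regions | provinces | subs | conts
deriving DecidableEq, Repr

-- the while-loop of B: pop the front task; containers splice children onto the
-- front of the agenda, leaves fold their locations into `region` unless in `core`
def pvRunAgenda (area_to_locs region_to_locs : PySem.Dict String (List String))
    (provinces subregions continents : PySem.Dict String (List (String × List String)))
    (core : PySem.Set String) :
    List (PvKind × String) → PySem.Set String → PySem.Set String
  | [], region => region
  | (PvKind.conts, key) :: rest, region =>
      pvRunAgenda area_to_locs region_to_locs provinces subregions continents core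
        (((PySem.Dict.mk (continents.getD key [])).getD "subregions" []).map (fun s => (PvKind.subs, s)) ++ rest) region
  | (PvKind.subs, key) :: rest, region =>
      pvRunAgenda area_to_locs region_to_locs provinces subregions continents core
        (((PySem.Dict.mk (subregions.getD key [])).getD "regions" []).map (fun r => (PvKind.regions, r)) ++ rest) region
  | (PvKind.areas, key) :: rest, region =>
      pvRunAgenda area_to_locs region_to_locs provinces subregions continents core
        rest ((area_to_locs.getD key []).foldl (fun s loc => if PySem.Set.contains core loc then s else PySem.Set.add s loc) region)
  | (PvKind.regions, key) :: rest, region =>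
      pvRunAgenda area_to_locs region_to_locs provinces subregions continents core
        rest ((region_to_locs.getD key []).foldl (fun s loc => if PySem.Set.contains core loc then s else PySem.Set.add s loc) region)
  | (PvKind.provinces, key) :: rest, region =>
      pvRunAgenda area_to_locs region_to_locs provinces subregions continents core
        rest (((PySem.Dict.mk (provinces.getD key [])).getD "locations" []).foldl (fun s loc => if PySem.Set.contains core loc then s else PySem.Set.add s loc) region)
termination_by agenda _ => (agenda.countP (fun t => decide (t.1 = PvKind.conts)), agenda.countP (fun t => decide (t.1 = PvKind.subs)), agenda.length)
decreasing_by
  all_goals simp [Function.comp_def]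
  all_goals first
    | (apply Prod.Lex.left; omega)
    | (apply Prod.Lex.right; first
        | (apply Prod.Lex.left; omega)
        | (apply Prod.Lex.right; omega))

def formable_target_locations_alt (rec : List (String × List String)) (geography : List (String × List (String × List (String × List String)))) (area_to_locs : List (String × List String)) (region_to_locs : List (String × List String)) : List String × List String :=
  let recd := PySem.Dict.mk rec
  let atd := PySem.Dict.mk area_to_locs
  let rtd := PySem.Dict.mk region_to_locs
  let geod := PySem.Dict.mk geography
  let provinces := PySem.Dict.mk (geod.getD "provinces" [])
  let subregions := PySem.Dict.mk (geod.getD "subregions" [])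
  let continents := PySem.Dict.mk (geod.getD "continents" [])
  -- core = set(rec.get("locations") or []); core.update(rec.get("must_own") or [])
  let core : PySem.Set String := PySem.Set.update (PySem.Set.ofList (recd.getD "locations" [])) (recd.getD "must_own" [])
  -- agenda = tagged tasks, seeded in source order
  let agenda : List (PvKind × String) :=
      (recd.getD "areas" []).map (fun a => (PvKind.areas, a))
      ++ (recd.getD "regions" []).map (fun r => (PvKind.regions, r))
      ++ (recd.getD "provinces" []).map (fun p => (PvKind.provinces, p))
      ++ (recd.getD "sub_continents" []).map (fun s => (PvKind.subs, s))
      ++ (recd.getD "continents" []).map (fun c => (PvKind.conts, c))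
  (core, pvRunAgenda atd rtd provinces subregions continents core agenda PySem.Set.empty)

-- ===== PRECONDITION & SPEC =====
def Spec_formable_target_locations (rec : List (String × List String)) (geography : List (String × List (String × List (String × List String)))) (area_to_locs : List (String × List String)) (region_to_locs : List (String × List String)) (out : List String × List String) : Prop := out = formable_target_locations_alt rec geography area_to_locs region_to_locs
instance (rec : List (String × List String)) (geography : List (String × List (String × List (String × List String)))) (area_to_locs : List (String × List String)) (region_to_locs : List (String × List String)) (out : List String × List String) : Decidable (Spec_formable_target_locations rec geography area_to_locs region_to_locs out) := by unfold Spec_formable_target_locations; infer_instance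

-- ===== CLAIM (what is proved, stated in full; the proofs are below) =====
def Claim_equal_formable_target_locations : Prop := ∀ (rec : List (String × List String)) (geography : List (String × List (String × List (String × List String)))) (area_to_locs : List (String × List String)) (region_to_locs : List (String × List String)), Dom_formable_target_locations rec geography area_to_locs region_to_locs → Spec_formable_target_locations rec geography area_to_locs region_to_locs (formable_target_locations rec geography area_to_locs region_to_locs)

-- ===== LEMMAS AND PROOFS =====

-- a loop of `update`s over lookups is one `update` by the flattened pool
theorem pvFoldlUpdate {b : Type} (g : b → List String) :
    ∀ (L : List b) (s : PySem.Set String),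
      L.foldl (fun t x => PySem.Set.update t (g x)) s = PySem.Set.update s (L.flatMap g)
  | [], s => by simp [PySem.Set.update]
  | x :: L, s => by
    rw [List.foldl_cons, pvFoldlUpdate g L, List.flatMap_cons, PySem.Set.update_append]

-- subtracting `core` after building the set = filtering against `core` while building
theorem pvDiffUpdate (core : PySem.Set String) :
    ∀ (l : List String) (s : PySem.Set String),
      PySem.Set.diff (PySem.Set.update s l) core
        = l.foldl (fun t x => if PySem.Set.contains core x then t else PySem.Set.add t x)
            (PySem.Set.diff s core)
  | [], s => by simp [PySem.Set.update]
  | x :: l, s => by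
    rw [PySem.Set.update_cons, pvDiffUpdate core l, List.foldl_cons]
    congr 1
    by_cases hc : x ∈ core
    · rw [if_pos ((PySem.Set.contains_iff core x).mpr hc)]
      by_cases hs : x ∈ s
      · rw [PySem.Set.add_of_mem hs]
      · rw [PySem.Set.add_of_not_mem hs]
        simp only [PySem.Set.diff, List.filter_append]
        simp [hc]
    · rw [if_neg (fun h => hc ((PySem.Set.contains_iff core x).mp h))]
      by_cases hs : x ∈ s
      · rw [PySem.Set.add_of_mem hs,
          PySem.Set.add_of_mem ((PySem.Set.mem_diff s core x).mpr ⟨hs, hc⟩)]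
      · rw [PySem.Set.add_of_not_mem hs,
          PySem.Set.add_of_not_mem (fun h => hs ((PySem.Set.mem_diff s core x).mp h).1)]
        simp only [PySem.Set.diff, List.filter_append]
        simp [hc]

-- what a single task of the agenda contributes, as a flat list of locations
def pvTaskLocs (area_to_locs region_to_locs : PySem.Dict String (List String))
    (provinces subregions continents : PySem.Dict String (List (String × List String))) :
    PvKind × String → List String
  | (PvKind.areas, key) => area_to_locs.getD key []
  | (PvKind.regions, key) => region_to_locs.getD key []
  | (PvKind.provinces, key) => (PySem.Dict.mk (provinces.getD key [])).getD "locations" []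
  | (PvKind.subs, key) =>
      ((PySem.Dict.mk (subregions.getD key [])).getD "regions" []).flatMap
        (fun r => region_to_locs.getD r [])
  | (PvKind.conts, key) =>
      ((PySem.Dict.mk (continents.getD key [])).getD "subregions" []).flatMap
        (fun s => ((PySem.Dict.mk (subregions.getD s [])).getD "regions" []).flatMap
          (fun r => region_to_locs.getD r []))

-- the worklist loop folds exactly the flattened contributions of its agenda
theorem pvRunAgenda_eq (area_to_locs region_to_locs : PySem.Dict String (List String))
    (provinces subregions continents : PySem.Dict String (List (String × List String)))
    (core : PySem.Set String) (agenda : List (PvKind × String)) (region : PySem.Set String) :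
    pvRunAgenda area_to_locs region_to_locs provinces subregions continents core agenda region
      = (agenda.flatMap (pvTaskLocs area_to_locs region_to_locs provinces subregions continents)).foldl
          (fun s loc => if PySem.Set.contains core loc then s else PySem.Set.add s loc) region := by
  fun_induction pvRunAgenda area_to_locs region_to_locs provinces subregions continents core agenda region with
  | case1 => simp
  | case2 key rest region ih =>
      rw [ih]
      simp [pvTaskLocs, List.flatMap_append, List.foldl_append, List.flatMap_map]
  | case3 key rest region ih =>
      rw [ih]
      simp [pvTaskLocs, List.flatMap_append, List.foldl_append, List.flatMap_map]
  | case4 key rest region ih =>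
      simp only [dite_eq_ite] at ih
      rw [ih]; simp [pvTaskLocs, List.foldl_append]
  | case5 key rest region ih =>
      simp only [dite_eq_ite] at ih
      rw [ih]; simp [pvTaskLocs, List.foldl_append]
  | case6 key rest region ih =>
      simp only [dite_eq_ite] at ih
      rw [ih]; simp [pvTaskLocs, List.foldl_append]

-- ===== VERDICT (by name: the statement is the Claim_ definition above) =====
theorem formable_target_locations_spec : Claim_equal_formable_target_locations := by
  intro rec geography area_to_locs region_to_locs _
  show formable_target_locations rec geography area_to_locs region_to_locs
      = formable_target_locations_alt rec geography area_to_locs region_to_locs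
  unfold formable_target_locations formable_target_locations_alt
  simp only [pvRunAgenda_eq, List.flatMap_append, List.flatMap_map]
  simp only [pvFoldlUpdate]
  congr 1
  have hcore : ((PySem.Dict.mk rec).getD "must_own" []).foldl PySem.Set.add
      (((PySem.Dict.mk rec).getD "locations" []).foldl PySem.Set.add PySem.Set.empty)
      = PySem.Set.update (PySem.Set.ofList ((PySem.Dict.mk rec).getD "locations" []))
          ((PySem.Dict.mk rec).getD "must_own" []) := rfl
  rw [← hcore]
  simp only [← PySem.Set.update_append]
  rw [pvDiffUpdate]
  simp [pvTaskLocs, List.append_assoc, PySem.Set.diff]
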